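-- pv_equiv track=rewrite | github.com/menacepicks/mlb | mlb_betting_data/sportsbooks/draftkings.py | _dk_extract_event_teams
-- ===== SOURCE A (Python) =====
-- def _dk_extract_event_teams(event):
--     home_team = ""
--     away_team = ""
--     for participant in (event.get("participants") or []):
--         if not isinstance(participant, dict):
--             continue
--         role = str(participant.get("venueRole") or "").lower()
--         name = str(participant.get("name") or "").strip()
--         if role == "home" and name:
--             home_team = name
--         elif role == "away" and name:
--             away_team = name
--     return home_team, away_team
-- ===== SOURCE B (Python) =====
-- def _dk_extract_event_teams(event):
--     participants = event.get("participants") or []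
--
--     def _last_name(want_role):
--         names = [
--             str(p.get("name") or "").strip()
--             for p in participants
--             if isinstance(p, dict)
--             and str(p.get("venueRole") or "").lower() == want_role
--             and str(p.get("name") or "").strip()
--         ]
--         return names[-1] if names else ""
--
--     return _last_name("home"), _last_name("away")
-- ===== Notes on version B (the rewrite author's own statement) =====
-- stated objective: idiomatic
-- what changed: Replaces the single interleaved accumulator loop with two declarative filtered passes (one per venue role) that collect the qualifying names and take the last one, instead of threading a mutable (home, away) pair through one loop.
import Mathlib
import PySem

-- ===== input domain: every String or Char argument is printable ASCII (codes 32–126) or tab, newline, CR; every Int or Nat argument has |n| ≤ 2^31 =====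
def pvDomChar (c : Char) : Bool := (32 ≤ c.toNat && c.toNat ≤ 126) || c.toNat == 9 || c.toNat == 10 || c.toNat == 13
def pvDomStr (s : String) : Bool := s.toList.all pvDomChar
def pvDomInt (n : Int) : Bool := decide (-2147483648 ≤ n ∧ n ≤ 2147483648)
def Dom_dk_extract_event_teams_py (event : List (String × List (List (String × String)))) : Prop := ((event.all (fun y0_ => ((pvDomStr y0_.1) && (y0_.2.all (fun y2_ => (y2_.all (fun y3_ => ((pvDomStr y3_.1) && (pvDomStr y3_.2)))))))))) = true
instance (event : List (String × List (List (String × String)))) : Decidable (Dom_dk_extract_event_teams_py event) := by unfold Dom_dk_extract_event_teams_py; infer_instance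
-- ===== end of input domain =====

-- B replaces A's single interleaved accumulator loop with two declarative filtered
-- passes (one per venue role) that take the last qualifying name (objective: idiomatic).

-- ===== PORT A =====
-- literal transliteration of A: one fold over the participants threading (home, away)
def dk_extract_event_teams_py (event : List (String × List (List (String × String)))) : String × String :=
  let participants := ((PySem.Dict.mk event).get? "participants").getD []
  participants.foldl
    (fun st p =>
      let role := PySem.Str.lower (((PySem.Dict.mk p).get? "venueRole").getD "")
      let name := PySem.Str.strip (((PySem.Dict.mk p).get? "name").getD "")
      if role = "home" ∧ name ≠ "" then (name, st.2)
      else if role = "away" ∧ name ≠ "" then (st.1, name)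
      else st)
    ("", "")

-- ===== PORT B =====
-- names of participants whose normalized venueRole equals `want` and whose
-- stripped name is non-empty (the comprehension in Source B)
def dk_role_names (participants : List (List (String × String))) (want : String) : List String :=
  participants.filterMap
    (fun p =>
      let role := PySem.Str.lower (((PySem.Dict.mk p).get? "venueRole").getD "")
      let name := PySem.Str.strip (((PySem.Dict.mk p).get? "name").getD "")
      if role = want ∧ name ≠ "" then some name else none)

-- names[-1] if names else ""
def dk_last_name (participants : List (List (String × String))) (want : String) : String :=
  ((dk_role_names participants want).getLast?).getD ""

def dk_extract_event_teams_py_alt (event : List (String × List (List (String × String)))) : String × String :=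
  let participants := ((PySem.Dict.mk event).get? "participants").getD []
  (dk_last_name participants "home", dk_last_name participants "away")

-- ===== PRECONDITION & SPEC =====
def Spec_dk_extract_event_teams_py (event : List (String × List (List (String × String)))) (out : String × String) : Prop := out = dk_extract_event_teams_py_alt event
instance (event : List (String × List (List (String × String)))) (out : String × String) : Decidable (Spec_dk_extract_event_teams_py event out) := by unfold Spec_dk_extract_event_teams_py; infer_instance

-- ===== CLAIM (what is proved, stated in full; the proofs are below) =====
def Claim_equal_dk_extract_event_teams_py : Prop := ∀ (event : List (String × List (List (String × String)))), Dom_dk_extract_event_teams_py event → Spec_dk_extract_event_teams_py event (dk_extract_event_teams_py event)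

-- ===== LEMMAS AND PROOFS =====

theorem dk_getLast?_cons_getD (a d : String) (xs : List String) :
    ((a :: xs).getLast?).getD d = (xs.getLast?).getD a := by
  cases h : xs.getLast? <;> simp_all [List.getLast?_cons]

-- loop invariant: A's fold from any accumulator is B's two last-name lookups,
-- falling back to the accumulator's components
theorem dk_loop_eq (l : List (List (String × String))) (st : String × String) :
    l.foldl
      (fun st p =>
        let role := PySem.Str.lower (((PySem.Dict.mk p).get? "venueRole").getD "")
        let name := PySem.Str.strip (((PySem.Dict.mk p).get? "name").getD "")
        if role = "home" ∧ name ≠ "" then (name, st.2)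
        else if role = "away" ∧ name ≠ "" then (st.1, name)
        else st) st
    = (((dk_role_names l "home").getLast?).getD st.1,
       ((dk_role_names l "away").getLast?).getD st.2) := by
  induction l generalizing st with
  | nil => simp [dk_role_names]
  | cons p t ih =>
    dsimp only [List.foldl_cons, dk_role_names, List.filterMap_cons]
    by_cases hh : PySem.Str.lower (((PySem.Dict.mk p).get? "venueRole").getD "") = "home" ∧
        PySem.Str.strip (((PySem.Dict.mk p).get? "name").getD "") ≠ ""
    · have hna : ¬ (PySem.Str.lower (((PySem.Dict.mk p).get? "venueRole").getD "") = "away" ∧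
          PySem.Str.strip (((PySem.Dict.mk p).get? "name").getD "") ≠ "") :=
        fun h => absurd (hh.1.symm.trans h.1) (by decide)
      rw [if_pos hh, if_pos hh, if_neg hna]
      dsimp only
      rw [ih, dk_getLast?_cons_getD]
      simp only [dk_role_names]
    · by_cases ha : PySem.Str.lower (((PySem.Dict.mk p).get? "venueRole").getD "") = "away" ∧
          PySem.Str.strip (((PySem.Dict.mk p).get? "name").getD "") ≠ ""
      · rw [if_neg hh, if_pos ha, if_neg hh, if_pos ha]
        dsimp only
        rw [ih, dk_getLast?_cons_getD]
        simp only [dk_role_names]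
      · rw [if_neg hh, if_neg ha, if_neg hh, if_neg ha]
        dsimp only
        rw [ih]
        simp only [dk_role_names]

-- ===== VERDICT (by name: the statement is the Claim_ definition above) =====
theorem dk_extract_event_teams_py_spec : Claim_equal_dk_extract_event_teams_py := by
  intro event _
  show _ = _
  simp only [dk_extract_event_teams_py, dk_extract_event_teams_py_alt, dk_last_name]
  rw [dk_loop_eq]
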